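-- pv_equiv track=rewrite | github.com/lilsweetcaligula/codewars | solutions/python/4.py | duplicate_encode
-- ===== SOURCE A (Python) =====
-- def duplicate_encode(word):
--     from collections import Counter
--     word = word.casefold()
--     counter = Counter(word)
--     result = ''
--     for letter in word:
--         if counter[letter] > 1:
--             result += ')'
--         else:
--             result += '('
--     return result
-- ===== SOURCE B (Python) =====
-- def duplicate_encode(word):
--     word = word.casefold()
--     first = {}
--     out = []
--     for i, c in enumerate(word):
--         if c in first:
--             out[first[c]] = ')'
--             out.append(')')
--         else:
--             first[c] = i
--             out.append('(')
--     return ''.join(out)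
-- ===== Notes on version B (the rewrite author's own statement) =====
-- stated objective: alternative
-- what changed: Replaced the two-stage Counter-then-emit scheme by a single pass that appends the unique-marker optimistically, remembers each character's first position in a dict, and retro-patches that position to the duplicate-marker when the character recurs - no frequency counting at all.
import Mathlib
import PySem

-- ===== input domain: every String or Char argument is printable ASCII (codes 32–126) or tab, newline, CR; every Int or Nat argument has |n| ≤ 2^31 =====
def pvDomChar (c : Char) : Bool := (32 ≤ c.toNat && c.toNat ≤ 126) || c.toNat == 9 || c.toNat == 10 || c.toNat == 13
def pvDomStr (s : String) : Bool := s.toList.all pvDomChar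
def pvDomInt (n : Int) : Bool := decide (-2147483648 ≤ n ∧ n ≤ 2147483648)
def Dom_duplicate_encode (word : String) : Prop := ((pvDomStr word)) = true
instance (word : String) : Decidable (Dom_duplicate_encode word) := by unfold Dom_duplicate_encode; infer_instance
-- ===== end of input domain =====

-- B replaces the Counter table + marking loop by a single pass that appends the unique-marker
-- optimistically, records each character's first position in a dict, and retro-patches that
-- position to the duplicate-marker when the character recurs — no frequency counting at all.
-- casefold = lower on the ASCII input domain, so both ports use PySem.Str.lower (exact on Dom).

-- ===== PORT A =====
def duplicate_encode (word : String) : String :=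
  let w := PySem.Str.lower word
  let counter : PySem.Dict Char Int := PySem.Dict.counter w.toList
  -- 'result += ")"' / 'result += "("' as a foldl over the characters
  String.ofList
    (w.toList.foldl (fun result letter =>
      if counter.getD letter 0 > 1 then result ++ [')'] else result ++ ['(']) [])

-- ===== PORT B =====
-- one iteration of B's loop: on a repeat patch out[first[c]] and append the duplicate-marker, else record i and append the unique-marker
def stepB (st : PySem.Dict Char Int × List Char) (ic : Int × Char) : PySem.Dict Char Int × List Char :=
  match st.1.get? ic.2 with
  | some j => (st.1, (PySem.List.pySetD st.2 j ')') ++ [')'])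
  | none => (st.1.insert ic.2 ic.1, st.2 ++ ['('])

def duplicate_encode_alt (word : String) : String :=
  let w := PySem.Str.lower word
  String.ofList (((PySem.List.enumerate w.toList).foldl stepB (PySem.Dict.empty, [])).2)

-- ===== PRECONDITION & SPEC =====
def Spec_duplicate_encode (word : String) (out : String) : Prop := out = duplicate_encode_alt word
instance (word : String) (out : String) : Decidable (Spec_duplicate_encode word out) := by unfold Spec_duplicate_encode; infer_instance

-- ===== CLAIM (what is proved, stated in full; the proofs are below) =====
def Claim_equal_duplicate_encode : Prop := ∀ (word : String), Dom_duplicate_encode word → Spec_duplicate_encode word (duplicate_encode word)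

-- ===== LEMMAS AND PROOFS =====

-- A's loop is the map marking characters by whether their count exceeds 1
theorem foldl_ite_append_eq_map {α β : Type} (p : α → Prop) [DecidablePred p] (a b : β)
    (l : List α) (acc : List β) :
    l.foldl (fun r x => if p x then r ++ [a] else r ++ [b]) acc
      = acc ++ l.map (fun x => if p x then a else b) := by
  induction l generalizing acc with
  | nil => simp
  | cons x xs ih => by_cases h : p x <;> simp [h, ih]

theorem one_lt_count_of_two_pos (p : List Char) (c : Char) (i j : Nat)
    (hi : i < p.length) (hj : j < p.length) (hij : i < j)
    (hci : p[i] = c) (hcj : p[j] = c) : 1 < p.count c := by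
  have h1 : c ∈ p.take j := by
    refine List.mem_iff_getElem.2 ⟨i, by rw [List.length_take]; omega, ?_⟩
    simp [List.getElem_take, hci]
  have h2 : c ∈ p.drop j := by
    refine List.mem_iff_getElem.2 ⟨0, by rw [List.length_drop]; omega, ?_⟩
    simp [List.getElem_drop, hcj]
  have := List.count_pos_iff.2 h1
  have := List.count_pos_iff.2 h2
  calc 1 < (p.take j).count c + (p.drop j).count c := by omega
    _ = p.count c := by rw [← List.count_append, List.take_append_drop]

theorem idxOf_le_of_getElem (p : List Char) (c : Char) (i : Nat)
    (hi : i < p.length) (h : p[i] = c) : p.idxOf c ≤ i := by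
  by_contra hgt
  rw [not_le] at hgt
  have h2 := List.not_of_lt_findIdx (p := (· == c)) (xs := p) (i := i) hgt
  simp at h2
  exact h2 h

theorem alt_fold_inv (p : List Char) :
    (((PySem.List.enumerate p).foldl stepB (PySem.Dict.empty, [])).1.get?
      = (fun c => if c ∈ p then some (p.idxOf c : Int) else none))
    ∧ ((PySem.List.enumerate p).foldl stepB (PySem.Dict.empty, [])).2
      = p.map (fun x => if 1 < p.count x then ')' else '(') := by
  induction p using List.reverseRecOn with
  | nil => constructor <;> rfl
  | append_singleton p c ih =>
    obtain ⟨ih1, ih2⟩ := ih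
    rw [PySem.List.enumerate_append, List.foldl_append]
    simp only [PySem.List.enumerate_cons, PySem.List.enumerate_nil, List.foldl_cons, List.foldl_nil]
    have hid := congrFun ih1 c
    by_cases hc : c ∈ p
    · -- repeat: patch the first occurrence, append ')'
      have hlt : p.idxOf c < p.length := List.idxOf_lt_length_of_mem hc
      simp only [stepB, hid, if_pos hc]
      refine ⟨?_, ?_⟩
      · rw [ih1]; funext d
        by_cases hd : d ∈ p
        · simp [hd, List.idxOf_append_of_mem hd]
        · have hd' : d ∉ p ++ [c] := by
            simp only [List.mem_append, List.mem_singleton]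
            rintro (h | rfl) <;> [exact hd h; exact hd hc]
          simp [hd, hd']
      · rw [ih2]
        simp only [PySem.List.pySetD_natCast, List.map_append]
        congr 1
        · apply List.ext_getElem (by simp)
          intro i hi hi'
          simp only [List.length_set, List.length_map] at hi
          rw [List.getElem_set, List.getElem_map, List.getElem_map]
          by_cases hpi : p[i] = c
          · have hcount : 1 < (p ++ [c]).count p[i] := by
              have h1 : 0 < p.count c := List.count_pos_iff.2 hc
              simp [List.count_append, hpi]; omega
            rw [if_pos hcount]
            by_cases hij : p.idxOf c = i
            · simp [hij]
            · have hle : p.idxOf c ≤ i := idxOf_le_of_getElem p c i hi hpi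
              have : 1 < p.count c :=
                one_lt_count_of_two_pos p c (p.idxOf c) i hlt hi (by omega)
                  (List.getElem_idxOf hlt) hpi
              simp [hij, hpi, this]
          · have hij : p.idxOf c ≠ i := fun h => hpi (h ▸ List.getElem_idxOf hlt)
            have hcnt : (p ++ [c]).count p[i] = p.count p[i] := by
              simp [List.count_append, List.count_singleton]
              exact fun h => hpi h.symm
            rw [if_neg hij, hcnt]
        · simp [hc]
    · -- first occurrence: record the index, append '('
      simp only [stepB, hid, if_neg hc]
      refine ⟨?_, ?_⟩
      · funext d
        rw [PySem.Dict.get?_insert, ih1]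
        by_cases hd : d = c
        · subst hd
          simp [List.idxOf_append_of_notMem hc]
        · rw [if_neg hd]
          by_cases hdp : d ∈ p
          · simp [hdp, List.idxOf_append_of_mem hdp]
          · have hd' : d ∉ p ++ [c] := by
              simp only [List.mem_append, List.mem_singleton]
              rintro (h | rfl) <;> [exact hdp h; exact hd rfl]
            simp [hdp, hd']
      · rw [ih2, List.map_append]
        congr 1
        · apply List.map_congr_left
          intro x hx
          have hxc : x ≠ c := fun h => hc (h ▸ hx)
          have : (p ++ [c]).count x = p.count x := by
            simp [List.count_append, List.count_singleton]
            exact fun h => hxc h.symm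
          rw [this]
        · have h0 : p.count c = 0 := List.count_eq_zero.2 hc
          simp [List.count_append, h0]

theorem duplicate_encode_eq_alt (word : String) :
    duplicate_encode word = duplicate_encode_alt word := by
  show String.ofList
      ((PySem.Str.lower word).toList.foldl (fun result letter =>
        if (PySem.Dict.counter (PySem.Str.lower word).toList).getD letter 0 > 1
        then result ++ [')'] else result ++ ['(']) [])
    = String.ofList (((PySem.List.enumerate (PySem.Str.lower word).toList).foldl stepB (PySem.Dict.empty, [])).2)
  rw [(alt_fold_inv (PySem.Str.lower word).toList).2]
  simp only [PySem.Dict.getD_counter, foldl_ite_append_eq_map, List.nil_append]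
  simp [gt_iff_lt, Nat.one_lt_cast]

-- ===== VERDICT (by name: the statement is the Claim_ definition above) =====
theorem duplicate_encode_spec : Claim_equal_duplicate_encode := by
  intro word _
  unfold Spec_duplicate_encode
  exact duplicate_encode_eq_alt word
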